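-- pv_equiv track=rewrite | github.com/CSIS-BU/sp22-cs330-finalproject-ethan-isaac | server.py | check_for_straight
-- ===== SOURCE A (Python) =====
-- def check_for_straight(hand):
--     in_a_row = []
--     for i in range(1, len(hand)):
--         if hand[i][1] == hand[i-1][1] + 1:
--             in_a_row.append(hand[i][1])
--         else:
--             in_a_row = []
--     return in_a_row if len(in_a_row) == 4 else False
-- ===== SOURCE B (Python) =====
-- def check_for_straight(hand):
--     # difference table between neighbouring card values
--     diffs = [hand[i][1] - hand[i - 1][1] for i in range(1, len(hand))]
--     # length of the trailing run of +1 steps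
--     run = 0
--     for d in reversed(diffs):
--         if d != 1:
--             break
--         run += 1
--     if run == 4:
--         return [hand[-4][1], hand[-3][1], hand[-2][1], hand[-1][1]]
--     return False
-- ===== Notes on version B (the rewrite author's own statement) =====
-- stated objective: alternative
-- what changed: A's accumulate-and-reset index loop is replaced by building a neighbour-difference table and scanning it once from the end for the trailing run of +1 steps (run == 4 iff A's accumulator has length 4).
import Mathlib
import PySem

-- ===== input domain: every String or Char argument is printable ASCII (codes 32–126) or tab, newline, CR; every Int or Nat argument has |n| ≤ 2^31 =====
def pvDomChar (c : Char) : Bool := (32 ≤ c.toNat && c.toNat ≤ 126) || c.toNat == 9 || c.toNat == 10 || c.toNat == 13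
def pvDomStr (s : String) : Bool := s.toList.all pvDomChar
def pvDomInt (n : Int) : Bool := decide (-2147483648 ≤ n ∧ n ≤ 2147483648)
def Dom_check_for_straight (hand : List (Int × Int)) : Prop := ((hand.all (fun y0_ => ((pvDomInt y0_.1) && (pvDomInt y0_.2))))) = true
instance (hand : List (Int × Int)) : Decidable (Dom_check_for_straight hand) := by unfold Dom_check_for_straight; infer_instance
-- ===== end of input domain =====

-- B replaces A's accumulate-and-reset index loop over the hand by a neighbour-difference
-- table scanned once from the end for its trailing run of +1 steps (alternative decomposition,
-- same cost); the truthiness of the Python result (a 4-card list or False) is what is ported.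

-- ===== PORT A =====
-- A's loop body: reset the accumulator on a non-consecutive step, else append the value.
def pvStepA (hand : List (Int × Int)) (acc : List Int) (i : Int) : List Int :=
  if (PySem.List.pyGetD hand i (0, 0)).2 == (PySem.List.pyGetD hand (i - 1) (0, 0)).2 + 1 then
    acc ++ [(PySem.List.pyGetD hand i (0, 0)).2]
  else []

-- in_a_row after the 'for i in range(1, len(hand))' loop
def pvRowA (hand : List (Int × Int)) : List Int :=
  (PySem.List.pyRange 1 hand.length 1).foldl (pvStepA hand) []

def check_for_straight (hand : List (Int × Int)) : Bool :=
  -- 'return in_a_row if len(in_a_row) == 4 else False' compared as a bool (list of 4 is truthy)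
  (pvRowA hand).length == 4

-- ===== PORT B =====
-- diffs = [hand[i][1] - hand[i-1][1] for i in range(1, len(hand))]
def pvDiffs (hand : List (Int × Int)) : List Int :=
  (PySem.List.pyRange 1 hand.length 1).map
    (fun i => (PySem.List.pyGetD hand i (0, 0)).2 - (PySem.List.pyGetD hand (i - 1) (0, 0)).2)

-- 'for d in reversed(diffs): if d != 1: break; run += 1'
def pvCountRun : List Int → Nat
  | [] => 0
  | d :: ds => if d = 1 then pvCountRun ds + 1 else 0

def check_for_straight_alt (hand : List (Int × Int)) : Bool :=
  -- 'return [last four values] if run == 4 else False' compared as a bool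
  pvCountRun (pvDiffs hand).reverse == 4

-- ===== PRECONDITION & SPEC =====
def Spec_check_for_straight (hand : List (Int × Int)) (out : Bool) : Prop := out = check_for_straight_alt hand
instance (hand : List (Int × Int)) (out : Bool) : Decidable (Spec_check_for_straight hand out) := by unfold Spec_check_for_straight; infer_instance

-- ===== CLAIM (what is proved, stated in full; the proofs are below) =====
def Claim_equal_check_for_straight : Prop := ∀ (hand : List (Int × Int)), Dom_check_for_straight hand → Spec_check_for_straight hand (check_for_straight hand)

-- ===== LEMMAS AND PROOFS =====

-- hand[i] with 0 ≤ i < len ws reads the same element before and after appending a card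
theorem pvGetD_append_left (ws : List (Int × Int)) (x : Int × Int) (i : Int)
    (h0 : 0 ≤ i) (h1 : i < (ws.length : Int)) :
    PySem.List.pyGetD (ws ++ [x]) i (0, 0) = PySem.List.pyGetD ws i (0, 0) := by
  rw [PySem.List.pyGetD_eq_getElem (ws ++ [x]) (0, 0) h0 (by simp; omega),
      PySem.List.pyGetD_eq_getElem ws (0, 0) h0 (by exact_mod_cast h1)]
  exact List.getElem_append_left (by omega)

theorem pvGetD_append_length (ws : List (Int × Int)) (x : Int × Int) :
    PySem.List.pyGetD (ws ++ [x]) (ws.length : Int) (0, 0) = x := by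
  rw [PySem.List.pyGetD_eq_getElem (ws ++ [x]) (0, 0) (by positivity) (by simp)]
  simp

theorem pvRowA_length (hand : List (Int × Int)) :
    (pvRowA hand).length = pvCountRun (pvDiffs hand).reverse := by
  induction hand using List.reverseRecOn with
  | nil => rfl
  | append_singleton ws x ih =>
    cases hws : ws with
    | nil => rfl
    | cons w ws' =>
      rw [← hws]
      have hn : 1 ≤ (ws.length : Int) := by
        subst hws; simp
      have hrange : PySem.List.pyRange 1 ((ws ++ [x]).length : Int) 1
          = PySem.List.pyRange 1 (ws.length : Int) 1 ++ [(ws.length : Int)] := by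
        have : ((ws ++ [x]).length : Int) = (ws.length : Int) + 1 := by simp
        rw [this, PySem.List.pyRange_one_succ_right hn]
      -- prefix of A's fold: appending x does not change the touched elements
      have hfold : (PySem.List.pyRange 1 (ws.length : Int) 1).foldl (pvStepA (ws ++ [x])) []
          = pvRowA ws := by
        unfold pvRowA
        refine PySem.List.foldl_congr_mem _ _ _ _ ?_
        intro acc i hi
        have hi' := (PySem.List.mem_pyRange_one).mp hi
        unfold pvStepA
        rw [pvGetD_append_left ws x i (by omega) (by omega),
            pvGetD_append_left ws x (i - 1) (by omega) (by omega)]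
      -- prefix of B's diff table likewise
      have hmap : (PySem.List.pyRange 1 (ws.length : Int) 1).map
            (fun i => (PySem.List.pyGetD (ws ++ [x]) i (0, 0)).2
              - (PySem.List.pyGetD (ws ++ [x]) (i - 1) (0, 0)).2)
          = pvDiffs ws := by
        unfold pvDiffs
        refine List.map_congr_left ?_
        intro i hi
        have hi' := (PySem.List.mem_pyRange_one).mp hi
        rw [pvGetD_append_left ws x i (by omega) (by omega),
            pvGetD_append_left ws x (i - 1) (by omega) (by omega)]
      have hlast : PySem.List.pyGetD (ws ++ [x]) ((ws.length : Int)) (0, 0) = x :=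
        pvGetD_append_length ws x
      have hprev : PySem.List.pyGetD (ws ++ [x]) ((ws.length : Int) - 1) (0, 0)
          = PySem.List.pyGetD ws ((ws.length : Int) - 1) (0, 0) :=
        pvGetD_append_left ws x _ (by omega) (by omega)
      unfold pvRowA pvDiffs
      rw [hrange, List.foldl_append, List.map_append, hfold, hmap]
      simp only [List.map_cons, List.map_nil, List.reverse_append, List.reverse_cons,
        List.reverse_nil, List.nil_append, List.cons_append, List.foldl_cons, List.foldl_nil]
      unfold pvStepA pvCountRun
      rw [hlast, hprev]
      set p := (PySem.List.pyGetD ws ((ws.length : Int) - 1) (0, 0)).2 with hp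
      by_cases hc : x.2 = p + 1
      · rw [if_pos (by simp [hc]), if_pos (by omega), List.length_append, ih]
        simp
      · rw [if_neg (by simpa using hc), if_neg (by omega)]
        rfl

-- ===== VERDICT (by name: the statement is the Claim_ definition above) =====
theorem check_for_straight_spec : Claim_equal_check_for_straight := by
  intro hand _
  unfold Spec_check_for_straight check_for_straight check_for_straight_alt
  rw [pvRowA_length]
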